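-- pv_equiv track=rewrite | github.com/lxchub-inst/ALP | bemol.py | diese
-- ===== SOURCE A (Python) =====
-- liste_note = ["Do", "Re", "Mi", "Fa", "Sol", "La", "Si"]
--
-- SAUT_NOTE = 4
--
-- def diese(nb_notes):
--     ele_notes = 0
--     note_bemol = ""
--
--     while nb_notes > 0:
--         if (ele_notes + SAUT_NOTE) < len(liste_note):
--             ele_notes = ele_notes + SAUT_NOTE
--         else:
--             ele_notes = ele_notes + SAUT_NOTE - len(liste_note)
--
--         note_bemol = liste_note[ele_notes]
--         nb_notes = nb_notes - 1
--     return note_bemol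
-- ===== SOURCE B (Python) =====
-- liste_note = ["Do", "Re", "Mi", "Fa", "Sol", "La", "Si"]
--
-- SAUT_NOTE = 4
--
-- def diese(nb_notes):
--     if nb_notes <= 0:
--         return ""
--     return liste_note[(SAUT_NOTE * nb_notes) % len(liste_note)]
-- ===== Notes on version B (the rewrite author's own statement) =====
-- stated objective: faster
-- what changed: Replaced the nb_notes-step simulation loop with the closed form liste_note[(4*nb_notes) % 7] (empty string for nb_notes <= 0).
import Mathlib
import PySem

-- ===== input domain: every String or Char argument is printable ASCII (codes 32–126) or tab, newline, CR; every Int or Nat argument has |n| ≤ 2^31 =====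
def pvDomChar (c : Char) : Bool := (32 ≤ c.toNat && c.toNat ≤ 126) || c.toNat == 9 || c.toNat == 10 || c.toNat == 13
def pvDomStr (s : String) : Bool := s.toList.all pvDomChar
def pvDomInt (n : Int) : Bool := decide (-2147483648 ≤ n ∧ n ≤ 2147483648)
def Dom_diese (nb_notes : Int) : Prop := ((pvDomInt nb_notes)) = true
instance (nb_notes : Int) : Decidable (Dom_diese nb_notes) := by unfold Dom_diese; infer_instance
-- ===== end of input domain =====

-- B replaces A's per-step simulation loop with the closed form liste_note[(4*nb_notes) % 7] ("" for nb_notes <= 0).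
-- ===== PORT A =====
def listeNote : List String := ["Do", "Re", "Mi", "Fa", "Sol", "La", "Si"]

-- the while loop of A, fuel = number of remaining iterations (nb_notes counts down to 0)
def dieseLoop : Nat → Nat → String → String
  | 0, _, note_bemol => note_bemol
  | f + 1, ele_notes, note_bemol =>
    let ele' := if ele_notes + 4 < listeNote.length then ele_notes + 4
                else ele_notes + 4 - listeNote.length
    dieseLoop f ele' ((PySem.List.pyGet? listeNote (ele' : Int)).getD note_bemol)

def diese (nb_notes : Int) : String := dieseLoop nb_notes.toNat 0 ""

-- ===== PORT B =====
def diese_alt (nb_notes : Int) : String :=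
  if nb_notes ≤ 0 then ""
  else (PySem.List.pyGet? listeNote (PySem.Int.mod (4 * nb_notes) (listeNote.length : Int))).getD ""

-- ===== PRECONDITION & SPEC =====
def Spec_diese (nb_notes : Int) (out : String) : Prop := out = diese_alt nb_notes
instance (nb_notes : Int) (out : String) : Decidable (Spec_diese nb_notes out) := by unfold Spec_diese; infer_instance

-- ===== CLAIM (what is proved, stated in full; the proofs are below) =====
def Claim_equal_diese : Prop := ∀ (nb_notes : Int), Dom_diese nb_notes → Spec_diese nb_notes (diese nb_notes)

-- ===== LEMMAS AND PROOFS =====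
lemma listeNote_length : listeNote.length = 7 := by decide

lemma dieseLoop_eq (n : Nat) : ∀ (ele : Nat) (note : String), ele < 7 →
    dieseLoop (n + 1) ele note = (listeNote[(ele + 4 * (n + 1)) % 7]?).getD "" := by
  induction n with
  | zero =>
    intro ele note h
    simp only [dieseLoop, listeNote_length]
    have he : (if ele + 4 < 7 then ele + 4 else ele + 4 - 7) = (ele + 4 * 1) % 7 := by split_ifs <;> omega
    rw [he, PySem.List.pyGet?_natCast]
    have hlt : (ele + 4 * 1) % 7 < listeNote.length := by rw [listeNote_length]; omega
    rw [List.getElem?_eq_getElem hlt]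
    rfl
  | succ n ih =>
    intro ele note h
    conv_lhs => rw [dieseLoop]
    simp only [listeNote_length]
    have he : (if ele + 4 < 7 then ele + 4 else ele + 4 - 7) = (ele + 4) % 7 := by split_ifs <;> omega
    rw [he, ih ((ele + 4) % 7) _ (by omega)]
    congr 2
    omega

lemma dieseLoop_zero (ele : Nat) (note : String) : dieseLoop 0 ele note = note := rfl

-- ===== VERDICT (by name: the statement is the Claim_ definition above) =====
theorem diese_spec : Claim_equal_diese := by
  intro nb _
  unfold Spec_diese diese diese_alt
  by_cases hle : nb ≤ 0
  · have : nb.toNat = 0 := Int.toNat_of_nonpos hle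
    rw [this, dieseLoop_zero, if_pos hle]
  · rw [not_le] at hle
    rw [if_neg (by omega)]
    have hn : nb.toNat = (nb.toNat - 1) + 1 := by omega
    rw [hn, dieseLoop_eq _ 0 "" (by omega)]
    have h4 : 4 * nb = ((4 * nb.toNat : Nat) : Int) := by
      push_cast; rw [Int.toNat_of_nonneg (by omega)]
    rw [h4, listeNote_length]
    rw [show ((7:Nat):Int) = ((7:Nat):Int) from rfl]
    rw [PySem.Int.mod_natCast, PySem.List.pyGet?_natCast]
    congr 2
    omega
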